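-- pv_equiv track=rewrite | github.com/CodewithWitcher/ClashKingAPI | routers/v2/player/utils.py | count_number_of_attacks_from_list
-- ===== SOURCE A (Python) =====
-- def count_number_of_attacks_from_list(attacks: list[int]) -> int:
--     """Count the number of attacks from a list of attack trophies.
--
--     Args:
--         attacks: List of stacked trophy values from attacks
--
--     Returns:
--         Total number of individual attacks
--     """
--     count = 0
--     for value in attacks:
--         if 280 < value <= 320:
--             count += 8
--         elif 240 < value <= 280:
--             count += 7
--         elif 200 < value <= 240:
--             count += 6
--         elif 160 < value <= 200:
--             count += 5
--         elif 120 < value <= 160: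
--             count += 4
--         elif 80 < value <= 120:
--             count += 3
--         elif 40 < value <= 80:
--             count += 2
--         else:
--             count += 1
--     return count
-- ===== SOURCE B (Python) =====
-- def count_number_of_attacks_from_list(attacks: list[int]) -> int:
--     """Count the number of attacks from a list of attack trophies."""
--     return sum((value + 39) // 40 if 40 < value <= 320 else 1 for value in attacks)
-- ===== Notes on version B (the rewrite author's own statement) =====
-- stated objective: simpler
-- what changed: Replaces the 8-way if/elif cascade with a closed-form ceiling division by 40 for values in (40, 320], with 1 elsewhere, summed in one generator expression.
import Mathlib
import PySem

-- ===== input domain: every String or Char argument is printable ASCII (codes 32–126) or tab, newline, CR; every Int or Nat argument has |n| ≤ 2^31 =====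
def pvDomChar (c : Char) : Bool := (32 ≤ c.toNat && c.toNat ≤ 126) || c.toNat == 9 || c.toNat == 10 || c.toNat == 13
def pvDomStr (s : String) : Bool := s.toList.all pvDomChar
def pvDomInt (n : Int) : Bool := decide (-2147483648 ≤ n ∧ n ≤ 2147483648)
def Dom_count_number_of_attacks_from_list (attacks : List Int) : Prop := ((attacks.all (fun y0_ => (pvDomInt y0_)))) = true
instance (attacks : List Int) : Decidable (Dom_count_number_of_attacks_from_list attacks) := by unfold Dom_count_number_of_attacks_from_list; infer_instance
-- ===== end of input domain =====

-- B replaces A's 8-way if/elif cascade with a closed-form ceiling division per element (objective: simpler).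


-- ===== PORT A =====
def count_number_of_attacks_from_list (attacks : List Int) : Int :=
  attacks.foldl (fun count value =>
    if 280 < value ∧ value ≤ 320 then count + 8
    else if 240 < value ∧ value ≤ 280 then count + 7
    else if 200 < value ∧ value ≤ 240 then count + 6
    else if 160 < value ∧ value ≤ 200 then count + 5
    else if 120 < value ∧ value ≤ 160 then count + 4
    else if 80 < value ∧ value ≤ 120 then count + 3
    else if 40 < value ∧ value ≤ 80 then count + 2
    else count + 1) 0

-- ===== PORT B =====
def count_number_of_attacks_from_list_alt (attacks : List Int) : Int :=
  (attacks.map (fun value =>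
    if 40 < value ∧ value ≤ 320 then PySem.Int.floordiv (value + 39) 40 else 1)).sum

-- ===== PRECONDITION & SPEC =====
def Spec_count_number_of_attacks_from_list (attacks : List Int) (out : Int) : Prop := out = count_number_of_attacks_from_list_alt attacks
instance (attacks : List Int) (out : Int) : Decidable (Spec_count_number_of_attacks_from_list attacks out) := by unfold Spec_count_number_of_attacks_from_list; infer_instance

-- ===== CLAIM (what is proved, stated in full; the proofs are below) =====
def Claim_equal_count_number_of_attacks_from_list : Prop := ∀ (attacks : List Int), Dom_count_number_of_attacks_from_list attacks → Spec_count_number_of_attacks_from_list attacks (count_number_of_attacks_from_list attacks)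

-- ===== LEMMAS AND PROOFS =====

-- per-element: the cascade's increment equals B's closed form
theorem pv_step_eq (value : Int) :
    (if 280 < value ∧ value ≤ 320 then (8 : Int)
     else if 240 < value ∧ value ≤ 280 then 7
     else if 200 < value ∧ value ≤ 240 then 6
     else if 160 < value ∧ value ≤ 200 then 5
     else if 120 < value ∧ value ≤ 160 then 4
     else if 80 < value ∧ value ≤ 120 then 3
     else if 40 < value ∧ value ≤ 80 then 2
     else 1)
    = (if 40 < value ∧ value ≤ 320 then PySem.Int.floordiv (value + 39) 40 else 1) := by
  simp only [PySem.Int.floordiv, Int.fdiv_eq_ediv]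
  split_ifs <;> omega

theorem pv_fold_sum (attacks : List Int) (c : Int) :
    attacks.foldl (fun count value =>
      if 280 < value ∧ value ≤ 320 then count + 8
      else if 240 < value ∧ value ≤ 280 then count + 7
      else if 200 < value ∧ value ≤ 240 then count + 6
      else if 160 < value ∧ value ≤ 200 then count + 5
      else if 120 < value ∧ value ≤ 160 then count + 4
      else if 80 < value ∧ value ≤ 120 then count + 3
      else if 40 < value ∧ value ≤ 80 then count + 2
      else count + 1) c
    = c + (attacks.map (fun value =>
        if 40 < value ∧ value ≤ 320 then PySem.Int.floordiv (value + 39) 40 else 1)).sum := by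
  induction attacks generalizing c with
  | nil => simp
  | cons x xs ih =>
    simp only [List.foldl_cons, List.map_cons, List.sum_cons, ih]
    have h := pv_step_eq x
    split_ifs at h ⊢ <;> omega

-- ===== VERDICT (by name: the statement is the Claim_ definition above) =====
theorem count_number_of_attacks_from_list_spec : Claim_equal_count_number_of_attacks_from_list := by
  intro attacks _
  unfold Spec_count_number_of_attacks_from_list count_number_of_attacks_from_list count_number_of_attacks_from_list_alt
  simpa using pv_fold_sum attacks 0
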